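-- pv_equiv track=rewrite | github.com/vasylcherepushko/Codewars | replace_every_nth.py | replace_nth
-- ===== SOURCE A (Python) =====
-- def replace_nth(text, n, old, new):
--     res = ''
--     skip = n - 1
--     for char in text:
--         if char == old and skip:
--             res += char
--             skip -= 1
--         elif char == old and not skip:
--             res += new
--             skip = n - 1
--         else:
--             res += char
--     return res
-- ===== SOURCE B (Python) =====
-- def replace_nth(text, n, old, new):
--     if n < 1:
--         return text
--     indices = [i for i, ch in enumerate(text) if ch == old]
--     targets = {idx for j, idx in enumerate(indices) if (j + 1) % n == 0}
--     return ''.join(new if i in targets else ch for i, ch in enumerate(text))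
-- ===== Notes on version B (the rewrite author's own statement) =====
-- stated objective: alternative
-- what changed: A does one stateful pass with a skip countdown that resets on each replacement; B first materialises the list of positions of old, selects every n-th occurrence into a set of target positions, and rebuilds the string by position membership, guarding n < 1 by returning text unchanged.
import Mathlib
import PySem

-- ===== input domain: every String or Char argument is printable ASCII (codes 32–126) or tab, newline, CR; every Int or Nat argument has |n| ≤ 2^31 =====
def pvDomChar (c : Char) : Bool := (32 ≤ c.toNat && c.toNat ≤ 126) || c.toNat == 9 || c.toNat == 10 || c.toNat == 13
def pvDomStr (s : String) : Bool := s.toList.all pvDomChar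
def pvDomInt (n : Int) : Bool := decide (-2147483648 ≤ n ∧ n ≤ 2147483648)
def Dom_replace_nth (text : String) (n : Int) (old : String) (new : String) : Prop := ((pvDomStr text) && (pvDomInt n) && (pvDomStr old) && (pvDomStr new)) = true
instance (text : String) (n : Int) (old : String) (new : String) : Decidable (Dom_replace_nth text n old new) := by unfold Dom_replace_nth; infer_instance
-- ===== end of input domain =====

-- B replaces A's stateful skip-countdown pass by a materialised occurrence-index table:
-- it collects the positions of `old`, selects every n-th one, and rebuilds the string by
-- position membership (objective: alternative decomposition, same cost).

-- ===== PORT A =====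
-- strings are carried as their character lists (res += … is list append); exact for Python str concat
def replace_nth (text : String) (n : Int) (old : String) (new : String) : String :=
  let st := text.toList.foldl (fun (st : List Char × Int) ch =>
    if [ch] = old.toList ∧ st.2 ≠ 0 then (st.1 ++ [ch], st.2 - 1)
    else if [ch] = old.toList ∧ st.2 = 0 then (st.1 ++ new.toList, n - 1)
    else (st.1 ++ [ch], st.2)) ([], n - 1)
  String.ofList st.1

-- ===== PORT B =====
def replace_nth_alt (text : String) (n : Int) (old : String) (new : String) : String :=
  if n < 1 then text
  else
    let indices := ((PySem.List.enumerate text.toList 0).filter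
        (fun p => [p.2] = old.toList)).map (·.1)
    let targets : List Int := PySem.Set.ofList (((PySem.List.enumerate indices 0).filter
        (fun p => PySem.Int.mod (p.1 + 1) n = 0)).map (·.2))
    -- ''.join(...) = concatenation of the pieces, at the character level
    String.ofList ((PySem.List.enumerate text.toList 0).map
        (fun p => if p.1 ∈ targets then new.toList else [p.2])).flatten

-- ===== PRECONDITION & SPEC =====
def Spec_replace_nth (text : String) (n : Int) (old : String) (new : String) (out : String) : Prop := out = replace_nth_alt text n old new
instance (text : String) (n : Int) (old : String) (new : String) (out : String) : Decidable (Spec_replace_nth text n old new out) := by unfold Spec_replace_nth; infer_instance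

-- ===== CLAIM (what is proved, stated in full; the proofs are below) =====
def Claim_equal_replace_nth : Prop := ∀ (text : String) (n : Int) (old : String) (new : String), Dom_replace_nth text n old new → Spec_replace_nth text n old new (replace_nth text n old new)

-- ===== LEMMAS AND PROOFS =====

-- A's loop as a structural recursion (state: remaining skip counter)
def outA (oldl newl : List Char) (n : Int) : List Char → Int → List Char
  | [], _ => []
  | ch :: cs, skip =>
    if [ch] = oldl ∧ skip ≠ 0 then ch :: outA oldl newl n cs (skip - 1)
    else if [ch] = oldl ∧ skip = 0 then newl ++ outA oldl newl n cs (n - 1)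
    else ch :: outA oldl newl n cs skip

theorem foldA_eq (oldl newl : List Char) (n : Int) :
    ∀ (cs : List Char) (res : List Char) (skip : Int),
    (cs.foldl (fun (st : List Char × Int) ch =>
      if [ch] = oldl ∧ st.2 ≠ 0 then (st.1 ++ [ch], st.2 - 1)
      else if [ch] = oldl ∧ st.2 = 0 then (st.1 ++ newl, n - 1)
      else (st.1 ++ [ch], st.2)) (res, skip)).1 = res ++ outA oldl newl n cs skip := by
  intro cs
  induction cs with
  | nil => intro res skip; simp [outA]
  | cons ch cs ih =>
    intro res skip
    simp only [List.foldl_cons, outA]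
    split_ifs with h1 h2 <;> simp [ih]

theorem outA_neg (oldl newl : List Char) (n : Int) :
    ∀ (cs : List Char) (skip : Int), skip < 0 → outA oldl newl n cs skip = cs := by
  intro cs
  induction cs with
  | nil => intro skip _; simp [outA]
  | cons ch cs ih =>
    intro skip h
    simp only [outA]
    split_ifs with h1 h2
    · simp [ih (skip - 1) (by omega)]
    · omega
    · simp [ih skip h]

-- positions of `old` in the suffix, with offset k
def idxsFrom (oldl : List Char) : List Char → Int → List Int
  | [], _ => []
  | ch :: cs, k =>
    if [ch] = oldl then k :: idxsFrom oldl cs (k + 1) else idxsFrom oldl cs (k + 1)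

theorem idxsFrom_eq (oldl : List Char) :
    ∀ (cs : List Char) (k : Int),
    ((PySem.List.enumerate cs k).filter (fun p => [p.2] = oldl)).map (·.1)
      = idxsFrom oldl cs k := by
  intro cs
  induction cs with
  | nil => intro k; simp [idxsFrom, PySem.List.enumerate_nil]
  | cons ch cs ih =>
    intro k
    simp only [PySem.List.enumerate_cons, List.filter_cons, idxsFrom]
    split_ifs with h <;> simp_all

theorem idxsFrom_ge (oldl : List Char) :
    ∀ (cs : List Char) (k i : Int), i ∈ idxsFrom oldl cs k → k ≤ i := by
  intro cs
  induction cs with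
  | nil => intro k i h; simp [idxsFrom] at h
  | cons ch cs ih =>
    intro k i h
    simp only [idxsFrom] at h
    split_ifs at h with hc
    · rcases List.mem_cons.mp h with rfl | h
      · omega
      · have := ih (k + 1) i h; omega
    · have := ih (k + 1) i h; omega

-- every n-th element (counter j = how many occurrences already consumed)
def sel (n : Int) : List Int → Int → List Int
  | [], _ => []
  | i :: is, j =>
    if (j + 1) % n = 0 then i :: sel n is (j + 1) else sel n is (j + 1)

theorem sel_eq (n : Int) (hn : 0 < n) :
    ∀ (l : List Int) (j : Int),
    ((PySem.List.enumerate l j).filter (fun p => PySem.Int.mod (p.1 + 1) n = 0)).map (·.2)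
      = sel n l j := by
  intro l
  induction l with
  | nil => intro j; simp [sel, PySem.List.enumerate_nil]
  | cons i is ih =>
    intro j
    simp only [PySem.List.enumerate_cons, List.filter_cons, sel,
      PySem.Int.mod_eq_emod_of_pos hn]
    split_ifs with h <;> simp_all

theorem sel_subset (n : Int) :
    ∀ (l : List Int) (j i : Int), i ∈ sel n l j → i ∈ l := by
  intro l
  induction l with
  | nil => intro j i h; simp [sel] at h
  | cons x is ih =>
    intro j i h
    simp only [sel] at h
    split_ifs at h with hc
    · rcases List.mem_cons.mp h with rfl | h
      · exact List.mem_cons_self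
      · exact List.mem_cons_of_mem _ (ih (j + 1) i h)
    · exact List.mem_cons_of_mem _ (ih (j + 1) i h)

-- B's rebuilding pass as a structural recursion
def build (newl : List Char) : List Char → Int → List Int → List Char
  | [], _, _ => []
  | ch :: cs, k, T =>
    (if k ∈ T then newl else [ch]) ++ build newl cs (k + 1) T

theorem build_eq (newl : List Char) :
    ∀ (cs : List Char) (k : Int) (T : List Int),
    ((PySem.List.enumerate cs k).map (fun p => if p.1 ∈ T then newl else [p.2])).flatten
      = build newl cs k T := by
  intro cs
  induction cs with
  | nil => intro k T; simp [build, PySem.List.enumerate_nil]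
  | cons ch cs ih =>
    intro k T
    simp only [PySem.List.enumerate_cons, List.map_cons, List.flatten_cons, build, ih]

theorem build_congr (newl : List Char) :
    ∀ (cs : List Char) (k : Int) (T T' : List Int),
    (∀ i, k ≤ i → (i ∈ T ↔ i ∈ T')) → build newl cs k T = build newl cs k T' := by
  intro cs
  induction cs with
  | nil => intro k T T' _; simp [build]
  | cons ch cs ih =>
    intro k T T' h
    simp only [build]
    rw [if_congr (h k le_rfl) rfl rfl, ih (k + 1) T T' (fun i hi => h i (by omega))]

theorem emod_step {n j : Int} (hn : 0 < n) (_hj : 0 ≤ j) :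
    (j % n = n - 1 ∧ (j + 1) % n = 0) ∨ (j % n ≠ n - 1 ∧ (j + 1) % n = j % n + 1) := by
  have h0 : 0 ≤ j % n := Int.emod_nonneg j (by omega)
  have h1 : j % n < n := Int.emod_lt_of_pos j hn
  by_cases h : j % n = n - 1
  · left
    refine ⟨h, ?_⟩
    calc (j + 1) % n = (j % n + 1 % n) % n := Int.add_emod j 1 n
      _ = (n - 1 + 1 % n) % n := by rw [h]
      _ = ((n - 1) % n + 1 % n) % n := by
            rw [Int.emod_eq_of_lt (show (0:Int) ≤ n - 1 by omega) (show n - 1 < n by omega)]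
      _ = (n - 1 + 1) % n := (Int.add_emod (n - 1) 1 n).symm
      _ = 0 := by simp
  · right
    refine ⟨h, ?_⟩
    have hn2 : 2 ≤ n := by omega
    calc (j + 1) % n = (j % n + 1 % n) % n := Int.add_emod j 1 n
      _ = (j % n + 1) % n := by
            rw [Int.emod_eq_of_lt (show (0:Int) ≤ 1 by omega) (show (1:Int) < n by omega)]
      _ = j % n + 1 := Int.emod_eq_of_lt (by omega) (by omega)

theorem master (oldl newl : List Char) (n : Int) (hn : 0 < n) :
    ∀ (cs : List Char) (k j : Int), 0 ≤ j →
    build newl cs k (sel n (idxsFrom oldl cs k) j) = outA oldl newl n cs (n - 1 - j % n) := by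
  intro cs
  induction cs with
  | nil => intro k j _; simp [build, outA]
  | cons ch cs ih =>
    intro k j hj
    have h0 : 0 ≤ j % n := Int.emod_nonneg j (by omega)
    have h1 : j % n < n := Int.emod_lt_of_pos j hn
    have hgtail : ∀ i, i ∈ idxsFrom oldl cs (k + 1) → k + 1 ≤ i :=
      fun i => idxsFrom_ge oldl cs (k + 1) i
    simp only [idxsFrom, outA, build]
    by_cases hc : [ch] = oldl
    · simp only [if_pos hc, sel]
      rcases emod_step hn hj with ⟨hr, hs⟩ | ⟨hr, hs⟩
      · -- this is the n-th occurrence: replaced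
        rw [if_pos hs]
        have hknotmem : k ∉ sel n (idxsFrom oldl cs (k + 1)) (j + 1) := by
          intro hmem
          have := hgtail k (sel_subset n _ _ _ hmem)
          omega
        rw [if_pos (List.mem_cons_self : k ∈ k :: sel n (idxsFrom oldl cs (k + 1)) (j + 1))]
        have hskip : n - 1 - j % n = 0 := by omega
        rw [if_neg (show ¬ ([ch] = oldl ∧ (n - 1 - j % n) ≠ 0) by tauto),
          if_pos ⟨hc, hskip⟩]
        congr 1
        rw [build_congr newl cs (k + 1) _ (sel n (idxsFrom oldl cs (k + 1)) (j + 1))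
          (fun i hi =>
            ⟨fun hm => by
              rcases List.mem_cons.mp hm with rfl | hm2
              · omega
              · exact hm2,
             fun hm => List.mem_cons_of_mem _ hm⟩)]
        rw [ih (k + 1) (j + 1) (by omega)]
        congr 1
        omega
      · -- occurrence kept; counter advances
        have hsel0 : ¬ ((j + 1) % n = 0) := by omega
        rw [if_neg hsel0]
        have hknotmem : k ∉ sel n (idxsFrom oldl cs (k + 1)) (j + 1) := by
          intro hmem
          have := hgtail k (sel_subset n _ _ _ hmem)
          omega
        rw [if_neg hknotmem]
        have hskip : n - 1 - j % n ≠ 0 := by omega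
        rw [if_pos ⟨hc, hskip⟩]
        simp only [List.singleton_append, List.cons.injEq, true_and]
        rw [ih (k + 1) (j + 1) (by omega)]
        congr 1
        omega
    · -- character does not match
      simp only [if_neg hc]
      have hknotmem : k ∉ sel n (idxsFrom oldl cs (k + 1)) j := by
        intro hmem
        have := hgtail k (sel_subset n _ _ _ hmem)
        omega
      rw [if_neg hknotmem]
      rw [if_neg (show ¬ ([ch] = oldl ∧ (n - 1 - j % n) ≠ 0) by tauto),
        if_neg (show ¬ ([ch] = oldl ∧ (n - 1 - j % n) = 0) by tauto)]
      simp only [List.singleton_append, List.cons.injEq, true_and]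
      exact ih (k + 1) j hj

-- ===== VERDICT (by name: the statement is the Claim_ definition above) =====
theorem replace_nth_spec : Claim_equal_replace_nth := by
  intro text n old new _
  unfold Spec_replace_nth replace_nth replace_nth_alt
  by_cases hn : n < 1
  · rw [if_pos hn]
    simp only [foldA_eq old.toList new.toList n text.toList [] (n - 1), List.nil_append]
    rw [outA_neg old.toList new.toList n text.toList (n - 1) (by omega)]
    exact String.ofList_toList
  · rw [if_neg hn]
    have hpos : 0 < n := by omega
    simp only [foldA_eq old.toList new.toList n text.toList [] (n - 1), List.nil_append]
    rw [idxsFrom_eq old.toList text.toList 0,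
      sel_eq n hpos (idxsFrom old.toList text.toList 0) 0,
      build_eq new.toList text.toList 0 _]
    rw [build_congr new.toList text.toList 0
      (PySem.Set.ofList (sel n (idxsFrom old.toList text.toList 0) 0))
      (sel n (idxsFrom old.toList text.toList 0) 0)
      (fun i _ => PySem.Set.mem_ofList _ i)]
    rw [master old.toList new.toList n hpos text.toList 0 0 le_rfl]
    congr 2
    simp
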